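-- pv_equiv track=rewrite | github.com/fedorova/perf-logging | WTPERF/rewrite-wtperf-config.py | parseNL
-- ===== SOURCE A (Python) =====
-- def parseNL(numbersLetters):
--
--     number = 0;
--     letter = '';
--
--     for w in numbersLetters:
--         if (len(w) == 0):
--             continue;
--         if (w.isnumeric()):
--             number = int(w);
--         else:
--             letter = w;
--
--     return number, letter;
-- ===== SOURCE B (Python) =====
-- def parseNL(numbersLetters):
--     # Scan from the end: the first hits from the back are A's "last" ones; stop early.
--     number = 0
--     letter = ''
--     gotNum = False
--     gotLet = False
--     for w in reversed(list(numbersLetters)):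
--         if len(w) == 0:
--             continue
--         if w.isnumeric():
--             if not gotNum:
--                 number = int(w)
--                 gotNum = True
--         else:
--             if not gotLet:
--                 letter = w
--                 gotLet = True
--         if gotNum and gotLet:
--             break
--     return number, letter
-- ===== Notes on version B (the rewrite author's own statement) =====
-- stated objective: alternative
-- what changed: B scans the tokens from the end with found-flags and breaks as soon as both the number and the letter are found, instead of A's full forward scan that keeps overwriting both results.
import Mathlib
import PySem

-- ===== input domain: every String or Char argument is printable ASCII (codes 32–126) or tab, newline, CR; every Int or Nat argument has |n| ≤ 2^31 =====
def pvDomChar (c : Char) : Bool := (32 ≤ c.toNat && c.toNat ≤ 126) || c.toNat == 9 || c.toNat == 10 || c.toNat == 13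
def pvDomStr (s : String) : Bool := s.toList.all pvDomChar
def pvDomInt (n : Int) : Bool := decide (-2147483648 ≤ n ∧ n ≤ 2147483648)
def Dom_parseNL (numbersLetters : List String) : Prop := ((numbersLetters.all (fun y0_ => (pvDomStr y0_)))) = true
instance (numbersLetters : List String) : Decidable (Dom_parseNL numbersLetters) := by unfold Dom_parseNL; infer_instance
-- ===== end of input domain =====

-- B replaces A's full forward scan by a backward scan with early exit once both results are found (alternative decomposition).


-- ===== PORT A =====
-- On the ASCII domain Python's str.isnumeric coincides with str.isdigit, ported as PySem.Str.strIsdigit;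
-- int(w) after isdigit always succeeds, so the .getD 0 default branch of ofStr? is never taken.
def parseNLStep (st : Int × String) (w : String) : Int × String :=
  if PySem.Str.len w = 0 then st
  else if PySem.Str.strIsdigit w then ((PySem.Int.ofStr? w).getD 0, st.2)
  else (st.1, w)

def parseNL (numbersLetters : List String) : Int × String :=
  numbersLetters.foldl parseNLStep (0, "")

-- ===== PORT B =====
-- backward scan with flags; breaks as soon as both the number and the letter have been found
def parseNLAltGo (ts : List String) (n : Int) (l : String) (gN gL : Bool) : Int × String :=
  match ts with
  | [] => (n, l)
  | w :: rest =>
    if PySem.Str.len w = 0 then parseNLAltGo rest n l gN gL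
    else
      let p1 := if PySem.Str.strIsdigit w then
                  (if gN then (n, gN) else ((PySem.Int.ofStr? w).getD 0, true))
                else (n, gN)
      let p2 := if PySem.Str.strIsdigit w then (l, gL)
                else (if gL then (l, gL) else (w, true))
      if p1.2 && p2.2 then (p1.1, p2.1)
      else parseNLAltGo rest p1.1 p2.1 p1.2 p2.2

def parseNL_alt (numbersLetters : List String) : Int × String :=
  parseNLAltGo numbersLetters.reverse 0 "" false false

-- ===== PRECONDITION & SPEC =====
def Spec_parseNL (numbersLetters : List String) (out : Int × String) : Prop := out = parseNL_alt numbersLetters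
instance (numbersLetters : List String) (out : Int × String) : Decidable (Spec_parseNL numbersLetters out) := by unfold Spec_parseNL; infer_instance

-- ===== CLAIM (what is proved, stated in full; the proofs are below) =====
def Claim_equal_parseNL : Prop := ∀ (numbersLetters : List String), Dom_parseNL numbersLetters → Spec_parseNL numbersLetters (parseNL numbersLetters)

-- ===== LEMMAS AND PROOFS =====

-- first numeric token's value scanning ts from the front (default d)
def pvFN : List String → Int → Int
  | [], d => d
  | w :: r, d =>
    if PySem.Str.len w ≠ 0 ∧ PySem.Str.strIsdigit w = true then (PySem.Int.ofStr? w).getD 0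
    else pvFN r d

-- first non-empty non-numeric token scanning ts from the front (default d)
def pvFL : List String → String → String
  | [], d => d
  | w :: r, d =>
    if PySem.Str.len w ≠ 0 ∧ PySem.Str.strIsdigit w = false then w
    else pvFL r d

theorem pvFN_append_singleton (ts : List String) (w : String) (d : Int) :
    pvFN (ts ++ [w]) d
      = pvFN ts (if PySem.Str.len w ≠ 0 ∧ PySem.Str.strIsdigit w = true then (PySem.Int.ofStr? w).getD 0 else d) := by
  induction ts with
  | nil => simp [pvFN]
  | cons x r ih => simp [pvFN, ih]

theorem pvFL_append_singleton (ts : List String) (w : String) (d : String) :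
    pvFL (ts ++ [w]) d
      = pvFL ts (if PySem.Str.len w ≠ 0 ∧ PySem.Str.strIsdigit w = false then w else d) := by
  induction ts with
  | nil => simp [pvFL]
  | cons x r ih => simp [pvFL, ih]

theorem parseNL_foldl_eq (xs : List String) (a : Int) (b : String) :
    xs.foldl parseNLStep (a, b) = (pvFN xs.reverse a, pvFL xs.reverse b) := by
  induction xs generalizing a b with
  | nil => simp [pvFN, pvFL]
  | cons w r ih =>
      simp only [List.foldl_cons, List.reverse_cons]
      rw [pvFN_append_singleton, pvFL_append_singleton]
      by_cases h0 : w = "" <;> by_cases hd : PySem.Chars.strIsdigit w.toList = true <;>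
        simp [parseNLStep, h0, hd, ih]

theorem parseNLAltGo_eq (ts : List String) (n : Int) (l : String) (gN gL : Bool) :
    parseNLAltGo ts n l gN gL
      = ((if gN then n else pvFN ts n), (if gL then l else pvFL ts l)) := by
  induction ts generalizing n l gN gL with
  | nil => cases gN <;> cases gL <;> simp [parseNLAltGo, pvFN, pvFL]
  | cons w r ih =>
      by_cases h0 : w = "" <;> by_cases hd : PySem.Chars.strIsdigit w.toList = true <;>
        cases gN <;> cases gL <;>
        simp [parseNLAltGo, h0, hd, ih, pvFN, pvFL]

-- ===== VERDICT (by name: the statement is the Claim_ definition above) =====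
theorem parseNL_spec : Claim_equal_parseNL := by
  intro xs _
  unfold Spec_parseNL parseNL parseNL_alt
  rw [parseNL_foldl_eq, parseNLAltGo_eq]
  simp
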